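-- pv_equiv track=rewrite | github.com/aparnaparashar/Zarq | helo edna.py | detect_homopolymers
-- ===== SOURCE A (Python) =====
-- def detect_homopolymers(sequence, threshold=5):
--     count = 1
--     max_count = 1
--     for i in range(1, len(sequence)):
--         if sequence[i] == sequence[i - 1]:
--             count += 1
--             max_count = max(max_count, count)
--         else:
--             count = 1
--     return max_count >= threshold
-- ===== SOURCE B (Python) =====
-- def detect_homopolymers(sequence, threshold=5):
--     runs = []
--     i = 0
--     n = len(sequence)
--     while i < n:
--         j = i + 1
--         while j < n and sequence[j] == sequence[i]:
--             j += 1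
--         runs.append(j - i)
--         i = j
--     return max(runs, default=1) >= threshold
-- ===== Notes on version B (the rewrite author's own statement) =====
-- stated objective: alternative
-- what changed: Replaces A's incremental counter/running-max index loop with a two-pointer pass that extracts the list of maximal run lengths and then reduces it with max(runs, default=1).
import Mathlib
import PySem

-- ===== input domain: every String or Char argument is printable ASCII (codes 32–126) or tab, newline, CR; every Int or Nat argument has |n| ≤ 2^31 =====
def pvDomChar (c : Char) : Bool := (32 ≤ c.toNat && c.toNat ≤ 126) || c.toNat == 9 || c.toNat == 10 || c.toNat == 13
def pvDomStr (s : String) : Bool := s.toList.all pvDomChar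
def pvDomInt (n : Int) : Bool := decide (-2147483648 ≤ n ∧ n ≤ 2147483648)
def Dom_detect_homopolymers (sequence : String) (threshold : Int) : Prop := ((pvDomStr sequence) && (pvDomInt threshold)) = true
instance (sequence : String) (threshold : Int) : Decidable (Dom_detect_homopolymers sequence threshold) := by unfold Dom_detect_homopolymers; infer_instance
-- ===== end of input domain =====

-- B replaces A's incremental counter/running-max loop with extracting the list of maximal run lengths and reducing it with max(runs, default=1); alternative decomposition, same O(n) cost.

-- ===== PORT A =====
-- literal port of A's index loop; indices i and i-1 are always in range, so pyGetD's default is never read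
def detect_homopolymers (sequence : String) (threshold : Int) : Bool :=
  let cs := sequence.toList
  let st := (PySem.List.pyRange 1 (cs.length : Int)).foldl
    (fun (st : Int × Int) i =>
      if PySem.List.pyGetD cs i ' ' == PySem.List.pyGetD cs (i - 1) ' ' then
        (st.1 + 1, max st.2 (st.1 + 1))
      else (1, st.2))
    (1, 1)
  decide (st.2 ≥ threshold)

-- ===== PORT B =====
-- inner while loop of Source B: how many leading chars of the rest equal c
def pvTakeRun (c : Char) : List Char → Nat
  | [] => 0
  | d :: ds => if d == c then pvTakeRun c ds + 1 else 0

-- outer while loop of Source B: the list of maximal run lengths (j - i), two-pointer style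
def pvRuns : List Char → List Int
  | [] => []
  | c :: rest =>
      ((pvTakeRun c rest + 1 : Nat) : Int) :: pvRuns (rest.drop (pvTakeRun c rest))
termination_by cs => cs.length
decreasing_by simp [List.length_drop]

def detect_homopolymers_alt (sequence : String) (threshold : Int) : Bool :=
  decide (PySem.List.maxD (pvRuns sequence.toList) (fun x => x) 1 ≥ threshold)

-- ===== PRECONDITION & SPEC =====
def Spec_detect_homopolymers (sequence : String) (threshold : Int) (out : Bool) : Prop := out = detect_homopolymers_alt sequence threshold
instance (sequence : String) (threshold : Int) (out : Bool) : Decidable (Spec_detect_homopolymers sequence threshold out) := by unfold Spec_detect_homopolymers; infer_instance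

-- ===== CLAIM (what is proved, stated in full; the proofs are below) =====
def Claim_equal_detect_homopolymers : Prop := ∀ (sequence : String) (threshold : Int), Dom_detect_homopolymers sequence threshold → Spec_detect_homopolymers sequence threshold (detect_homopolymers sequence threshold)

-- ===== LEMMAS AND PROOFS =====

-- proof-side recursion equivalent to A's index loop, walking the list directly
def loopA : Char → Int → Int → List Char → Int × Int
  | _, c, m, [] => (c, m)
  | prev, c, m, d :: ds =>
      if d == prev then loopA d (c + 1) (max m (c + 1)) ds else loopA d 1 m ds

-- proof-side maximal run length, seeded with the current run count k
def runG : Char → Int → List Char → Int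
  | _, k, [] => k
  | prev, k, d :: ds => if d == prev then runG d (k + 1) ds else max k (runG d 1 ds)

lemma runG_ge (ds : List Char) : ∀ (prev : Char) (k : Int), k ≤ runG prev k ds := by
  induction ds with
  | nil => intro prev k; simp [runG]
  | cons d ds ih =>
      intro prev k
      by_cases h : (d == prev) = true
      · simpa [runG, h] using le_trans (by omega) (ih d (k + 1))
      · simp [runG, h]

lemma runG_ge_take (ds : List Char) : ∀ (prev : Char) (k : Nat),
    ((k + pvTakeRun prev ds : Nat) : Int) ≤ runG prev (k : Int) ds := by
  induction ds with
  | nil => intro prev k; simp [pvTakeRun, runG]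
  | cons d ds ih =>
      intro prev k
      by_cases h : (d == prev) = true
      · have hb : (d == prev) = true := h
        have := ih d (k + 1)
        simp only [runG, pvTakeRun, hb, if_true]
        have hpd : prev = d := (beq_iff_eq.mp hb).symm
        subst hpd
        calc ((k + (pvTakeRun prev ds + 1) : Nat) : Int)
            = ((k + 1 + pvTakeRun prev ds : Nat) : Int) := by push_cast; ring
          _ ≤ runG prev ((k : Int) + 1) ds := by
              have := ih prev (k + 1); push_cast at this ⊢; convert this using 2
          _ = runG prev (((k : Nat) : Int) + 1) ds := rfl
      · simp [runG, pvTakeRun, h]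

-- A's loop computes max m (maximal run length), given the invariants 1 ≤ m and k ≤ m
lemma loopA_eq_runG (ds : List Char) : ∀ (prev : Char) (k m : Int), 1 ≤ m → k ≤ m →
    (loopA prev k m ds).2 = max m (runG prev k ds) := by
  induction ds with
  | nil => intro prev k m h1 hk; simp [loopA, runG]; omega
  | cons d ds ih =>
      intro prev k m h1 hk
      by_cases h : (d == prev) = true
      · have hG := runG_ge ds d (k + 1)
        simp only [loopA, runG, h, if_true]
        rw [ih d (k + 1) (max m (k + 1)) (le_trans h1 (le_max_left _ _))
              (le_max_right _ _)]
        rw [max_assoc]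
        congr 1
        exact max_eq_right hG
      · simp only [loopA, runG, h, Bool.false_eq_true, if_false]
        rw [ih d 1 m h1 h1]
        omega

-- folding max over the run lengths (seeded with the current run) is runG
lemma foldl_max_runs (ds : List Char) : ∀ (prev : Char) (k : Nat) (a : Int),
    List.foldl max a
        (((k + pvTakeRun prev ds : Nat) : Int) :: pvRuns (ds.drop (pvTakeRun prev ds)))
      = max a (runG prev (k : Int) ds) := by
  induction ds with
  | nil => intro prev k a; simp [pvTakeRun, runG, pvRuns]
  | cons d ds ih =>
      intro prev k a
      by_cases h : (d == prev) = true
      · have hpd : prev = d := (beq_iff_eq.mp h).symm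
        subst hpd
        simp only [pvTakeRun, runG, h, if_true, List.drop_succ_cons]
        have := ih prev (k + 1) a
        push_cast at this ⊢
        convert this using 3
        ring
      · simp only [pvTakeRun, runG, h, Bool.false_eq_true, if_false, List.drop_zero,
          Nat.add_zero]
        rw [pvRuns]
        rw [List.foldl_cons, List.foldl_cons]
        have := ih d 1 (max a (k : Int))
        rw [Nat.add_comm 1 (pvTakeRun d ds)] at this
        rw [List.foldl_cons] at this
        push_cast at this ⊢
        rw [this, max_assoc]

lemma pvRuns_cons (c : Char) (rest : List Char) :
    pvRuns (c :: rest)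
      = ((pvTakeRun c rest + 1 : Nat) : Int) :: pvRuns (rest.drop (pvTakeRun c rest)) := by
  rw [pvRuns]

-- A's index loop equals loopA on the remaining suffix
lemma foldA_eq_loopA (cs : List Char) : ∀ (fuel k : Nat) (c m : Int),
    cs.length ≤ k + 1 + fuel →
    (PySem.List.pyRange ((k : Int) + 1) (cs.length : Int)).foldl
        (fun (st : Int × Int) i =>
          if PySem.List.pyGetD cs i ' ' == PySem.List.pyGetD cs (i - 1) ' ' then
            (st.1 + 1, max st.2 (st.1 + 1))
          else (1, st.2)) (c, m)
      = loopA (cs.getD k ' ') c m (cs.drop (k + 1)) := by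
  intro fuel
  induction fuel with
  | zero =>
      intro k c m hle
      rw [PySem.List.pyRange_one_eq_nil (by exact_mod_cast Nat.le_of_succ_le_succ (by omega))]
      rw [List.drop_eq_nil_of_le (by omega)]
      simp [loopA]
  | succ f ih =>
      intro k c m hle
      by_cases hk : k + 1 < cs.length
      · rw [PySem.List.pyRange_one_cons (by exact_mod_cast hk)]
        rw [List.foldl_cons]
        have e1 : (k : Int) + 1 = ((k + 1 : Nat) : Int) := by push_cast; ring
        have e2 : ((k + 1 : Nat) : Int) - 1 = ((k : Nat) : Int) := by push_cast; ring
        rw [e1, e2] at *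
        rw [PySem.List.pyGetD_natCast, PySem.List.pyGetD_natCast]
        have hdrop : cs.drop (k + 1) = cs[k + 1] :: cs.drop (k + 2) := by
          rw [List.drop_eq_getElem_cons hk]
        have hget : cs.getD (k + 1) ' ' = cs[k + 1] := List.getD_eq_getElem cs ' ' hk
        rw [hdrop, hget]
        by_cases hc : (cs[k + 1] == cs.getD k ' ') = true
        · simp only [loopA, hc, if_true]
          have := ih (k + 1) (c + 1) (max m (c + 1)) (by omega)
          rw [List.getD_eq_getElem cs ' ' hk] at this
          convert this using 3
        · simp only [loopA, hc, if_false, Bool.false_eq_true]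
          have := ih (k + 1) 1 m (by omega)
          rw [List.getD_eq_getElem cs ' ' hk] at this
          convert this using 3
      · rw [PySem.List.pyRange_one_eq_nil (by omega)]
        rw [List.drop_eq_nil_of_le (by omega)]
        simp [loopA]

lemma core_eq (cs : List Char) (threshold : Int) :
    (decide ((((PySem.List.pyRange 1 (cs.length : Int)).foldl
        (fun (st : Int × Int) i =>
          if PySem.List.pyGetD cs i ' ' == PySem.List.pyGetD cs (i - 1) ' ' then
            (st.1 + 1, max st.2 (st.1 + 1))
          else (1, st.2)) (1, 1)).2) ≥ threshold) : Bool)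
      = decide (PySem.List.maxD (pvRuns cs) (fun x => x) 1 ≥ threshold) := by
  cases cs with
  | nil =>
      rw [show ((List.length ([] : List Char) : Int)) = 0 by simp]
      rw [PySem.List.pyRange_one_eq_nil (by omega)]
      simp [pvRuns, PySem.List.maxD, PySem.List.max?]
  | cons c rest =>
      have hA := foldA_eq_loopA (c :: rest) (c :: rest).length 0 1 1 (by omega)
      have e0 : ((0 : Nat) : Int) + 1 = (1 : Int) := by norm_num
      rw [e0] at hA
      rw [hA]
      simp only [List.getD_cons_zero, List.drop_succ_cons, List.drop_zero]
      rw [loopA_eq_runG rest c 1 1 le_rfl le_rfl]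
      rw [max_eq_right (by simpa using runG_ge rest c 1)]
      -- B side
      rw [pvRuns_cons]
      rw [PySem.List.maxD]
      rw [PySem.List.max?_id_cons]
      simp only [Option.getD_some]
      have := foldl_max_runs rest c 1
          (((pvTakeRun c rest + 1 : Nat) : Int))
      rw [Nat.add_comm 1 (pvTakeRun c rest)] at this
      rw [List.foldl_cons] at this
      rw [max_self] at this
      rw [this]
      rw [max_eq_right (by simpa [Nat.add_comm] using runG_ge_take rest c 1)]
      norm_cast

-- ===== VERDICT (by name: the statement is the Claim_ definition above) =====
theorem detect_homopolymers_spec : Claim_equal_detect_homopolymers := by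
  intro sequence threshold _
  unfold Spec_detect_homopolymers detect_homopolymers detect_homopolymers_alt
  exact core_eq sequence.toList threshold
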